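-- pv_equiv track=rewrite | github.com/kylelemons/adventofcodesolutions | 2020/day03/day03.py | part2
-- ===== SOURCE A (Python) =====
-- from functools import reduce
-- from dataclasses import dataclass
--
-- @dataclass
-- class Row:
--     map: list[str]
--
-- @dataclass
-- class Point:
--     r: int
--     c: int
--
--     def add(self, p):
--         return Point(self.r + p.r, self.c + p.c)
--
-- def parse(input: str) -> list[Row]:
--     return Row(input.splitlines())
--
-- def part2(input: str) -> int:
--     def do(delta: Point) -> int:
--         inp = parse(input)
--         loc = Point(0,0)
--         count = 0
--         while loc.r < len(inp.map):
--             if inp.map[loc.r][loc.c % len(inp.map[loc.r])] == '#':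
--                 count += 1
--             loc = loc.add(delta)
--         return count
--     return reduce(lambda x,y: x*y, [
--         do(delta)
--         for delta in [
--             Point(1,1),
--             Point(1,3),
--             Point(1,5),
--             Point(1,7),
--             Point(2,1),
--         ]
--     ])
-- ===== SOURCE B (Python) =====
-- def part2(input: str) -> int:
--     lines = input.splitlines()
--     slopes = [(1, 1), (1, 3), (1, 5), (1, 7), (2, 1)]
--     counts = [0, 0, 0, 0, 0]
--     for r, row in enumerate(lines):
--         counts = [c + (1 if r % dr == 0 and row[((r // dr) * dc) % len(row)] == '#' else 0)
--                   for (dr, dc), c in zip(slopes, counts)]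
--     product = 1
--     for c in counts:
--         product *= c
--     return product
-- ===== Notes on version B (the rewrite author's own statement) =====
-- stated objective: alternative
-- what changed: A traverses the whole grid five times, once per slope, with a (row,col) walker; B parses once and makes a single pass over the rows, updating all five slope counters at each row, then multiplies them.
import Mathlib
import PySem

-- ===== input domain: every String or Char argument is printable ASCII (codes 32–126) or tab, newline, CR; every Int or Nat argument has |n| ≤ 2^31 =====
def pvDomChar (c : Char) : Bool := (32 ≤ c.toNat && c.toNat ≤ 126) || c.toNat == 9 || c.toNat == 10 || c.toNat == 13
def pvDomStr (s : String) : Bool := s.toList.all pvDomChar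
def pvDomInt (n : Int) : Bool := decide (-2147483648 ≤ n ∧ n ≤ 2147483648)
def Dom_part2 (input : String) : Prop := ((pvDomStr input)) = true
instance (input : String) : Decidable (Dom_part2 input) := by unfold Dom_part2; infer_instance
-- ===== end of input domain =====

-- B replaces A's five separate whole-grid traversals (one per slope) by a single pass over the
-- rows that updates five slope counters at once; objective: alternative decomposition, same cost.


-- ===== PORT A =====
-- the while loop of `do`: advances (r, c) by (dr, dc) until r falls off the map
-- (dr is always positive at the call sites; the positivity argument only justifies termination)
def part2Do (lines : List (List Char)) (dr dc : Int) (hdr : 0 < dr) (r c count : Int) : Int :=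
  if h : r < (lines.length : Int) then
    part2Do lines dr dc hdr (r + dr) (c + dc)
      (if PySem.List.pyGetD (PySem.List.pyGetD lines r [])
            (PySem.Int.mod c ((PySem.List.pyGetD lines r []).length : Int)) ' ' = '#'
       then count + 1 else count)
  else count
termination_by ((lines.length : Int) - r).toNat
decreasing_by omega

def part2 (input : String) : Int :=
  let lines := (PySem.Str.splitlines input).map String.toList
  let vals : List Int :=
    [part2Do lines 1 1 (by omega) 0 0 0,
     part2Do lines 1 3 (by omega) 0 0 0,
     part2Do lines 1 5 (by omega) 0 0 0,
     part2Do lines 1 7 (by omega) 0 0 0,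
     part2Do lines 2 1 (by omega) 0 0 0]
  -- reduce(lambda x,y: x*y, vals): fold the product starting from the first element
  vals.tail.foldl (· * ·) (vals.headD 0)

-- ===== PORT B =====
def part2_alt (input : String) : Int :=
  let lines := (PySem.Str.splitlines input).map String.toList
  let slopes : List (Int × Int) := [(1, 1), (1, 3), (1, 5), (1, 7), (2, 1)]
  let counts := (PySem.List.enumerate lines 0).foldl
    (fun counts rc =>
      (slopes.zip counts).map (fun p =>
        p.2 + if PySem.Int.mod rc.1 p.1.1 = 0 ∧
                  PySem.List.pyGetD rc.2
                    (PySem.Int.mod (PySem.Int.floordiv rc.1 p.1.1 * p.1.2) (rc.2.length : Int)) ' ' = '#'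
              then 1 else 0))
    [0, 0, 0, 0, 0]
  counts.foldl (· * ·) 1

-- ===== PRECONDITION & SPEC =====
-- Pre_ excludes inputs one of whose lines is empty: there both Pythons raise ZeroDivisionError
-- (column index modulo the line's length 0).
def Pre_part2 (input : String) : Prop := ∀ l ∈ PySem.Str.splitlines input, l ≠ ""
instance (input : String) : Decidable (Pre_part2 input) := by unfold Pre_part2; infer_instance

def pvWitness_part2 : String := "..##.#\n#...#.\n.#..#."

def Spec_part2 (input : String) (out : Int) : Prop := out = part2_alt input
instance (input : String) (out : Int) : Decidable (Spec_part2 input out) := by unfold Spec_part2; infer_instance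

-- ===== CLAIM (what is proved, stated in full; the proofs are below) =====
def Claim_equal_part2 : Prop := ∀ (input : String), Dom_part2 input → Pre_part2 input → Spec_part2 input (part2 input)

-- ===== LEMMAS AND PROOFS =====

-- 0/1 indicator of a tree hit, as B tests it at row index r (one step of B's comprehension)
def hitInd (dr dc : Int) (r : Int) (row : List Char) : Int :=
  if PySem.Int.mod r dr = 0 ∧
      PySem.List.pyGetD row
        (PySem.Int.mod (PySem.Int.floordiv r dr * dc) ((row.length : Int))) ' ' = '#'
  then 1 else 0

-- total number of hits of slope (dr, dc) over a row suffix whose first row has index r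
def tcount (dr dc : Int) : List (List Char) → Int → Int
  | [], _ => 0
  | row :: rest, r => hitInd dr dc r row + tcount dr dc rest (r + 1)

theorem part2_alt_fold (lines : List (List Char)) (r c1 c2 c3 c4 c5 : Int) :
    (PySem.List.enumerate lines r).foldl
      (fun counts rc =>
        (([(1, 1), (1, 3), (1, 5), (1, 7), (2, 1)] : List (Int × Int)).zip counts).map (fun p =>
          p.2 + if PySem.Int.mod rc.1 p.1.1 = 0 ∧
                    PySem.List.pyGetD rc.2
                      (PySem.Int.mod (PySem.Int.floordiv rc.1 p.1.1 * p.1.2) (rc.2.length : Int)) ' ' = '#'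
                then 1 else 0))
      [c1, c2, c3, c4, c5]
    = [c1 + tcount 1 1 lines r, c2 + tcount 1 3 lines r, c3 + tcount 1 5 lines r,
       c4 + tcount 1 7 lines r, c5 + tcount 2 1 lines r] := by
  induction lines generalizing r c1 c2 c3 c4 c5 with
  | nil => simp [PySem.List.enumerate_nil, tcount]
  | cons row rest ih =>
      rw [PySem.List.enumerate_cons]
      simp only [List.foldl_cons, List.zip_cons_cons, List.zip_nil_right, List.map_cons,
        List.map_nil]
      rw [ih]
      simp [tcount, hitInd, add_assoc]

-- rows strictly between two consecutive multiples of dr contribute nothing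
theorem tcount_skip (dr dc : Nat) (lines : List (List Char)) (j s : Nat)
    (h1 : j * dr < s) (h2 : s ≤ (j + 1) * dr) :
    tcount (dr : Int) (dc : Int) (lines.drop s) (s : Int)
      = tcount (dr : Int) (dc : Int) (lines.drop ((j + 1) * dr)) (((j + 1) * dr : Nat) : Int) := by
  rcases Nat.lt_or_ge s ((j + 1) * dr) with hlt | hge
  · have hs : ¬ (dr ∣ s) := by
      rintro ⟨k, rfl⟩
      rcases Nat.lt_or_ge k (j + 1) with h | h
      · have hk : dr * k ≤ j * dr := by
          calc dr * k ≤ dr * j := Nat.mul_le_mul_left dr (Nat.lt_succ_iff.mp h)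
          _ = j * dr := Nat.mul_comm _ _
        omega
      · have hk : (j + 1) * dr ≤ dr * k := by
          calc (j + 1) * dr = dr * (j + 1) := Nat.mul_comm _ _
          _ ≤ dr * k := Nat.mul_le_mul_left dr h
        omega
    rcases Nat.lt_or_ge s lines.length with hsl | hsl
    · rw [← List.getElem_cons_drop (as := lines) (i := s) hsl, tcount]
      have hz : hitInd (dr : Int) (dc : Int) (s : Int) lines[s] = 0 := by
        unfold hitInd
        rw [if_neg]
        rintro ⟨hmod, -⟩
        rw [PySem.Int.mod_natCast] at hmod
        exact hs (Nat.dvd_of_mod_eq_zero (by exact_mod_cast hmod))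
      rw [hz, zero_add]
      have := tcount_skip dr dc lines j (s + 1) (by omega) (by omega)
      simpa using this
    · rw [List.drop_eq_nil_of_le hsl, List.drop_eq_nil_of_le (by omega)]
      simp [tcount]
  · have : s = (j + 1) * dr := by omega
    subst this; rfl
termination_by (j + 1) * dr - s

-- A's while loop, entered at the j-th landing point of slope (dr, dc), counts exactly the
-- hits tcount finds on the remaining rows
theorem part2Do_eq_tcount (dr dc : Nat) (hdr : 0 < (dr : Int)) (lines : List (List Char))
    (j : Nat) (count : Int) :
    part2Do lines (dr : Int) (dc : Int) hdr ((j * dr : Nat) : Int) ((j * dc : Nat) : Int) count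
      = count + tcount (dr : Int) (dc : Int) (lines.drop (j * dr)) ((j * dr : Nat) : Int) := by
  have hdr' : 0 < dr := by exact_mod_cast hdr
  rw [part2Do]
  rcases Nat.lt_or_ge (j * dr) lines.length with hlt | hge
  · rw [dif_pos (by exact_mod_cast hlt)]
    have hrow : PySem.List.pyGetD lines ((j * dr : Nat) : Int) [] = lines[j * dr] := by
      rw [PySem.List.pyGetD_natCast]
      exact List.getD_eq_getElem lines [] hlt
    have hhit : hitInd (dr : Int) (dc : Int) ((j * dr : Nat) : Int) lines[j * dr]
        = if PySem.List.pyGetD lines[j * dr]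
              (PySem.Int.mod ((j * dc : Nat) : Int) ((lines[j * dr]).length : Int)) ' ' = '#'
          then 1 else 0 := by
      unfold hitInd
      have hm : PySem.Int.mod ((j * dr : Nat) : Int) (dr : Int) = 0 := by
        rw [PySem.Int.mod_natCast]; simp [Nat.mul_mod_left]
      have hd : PySem.Int.floordiv ((j * dr : Nat) : Int) (dr : Int) * (dc : Int)
          = ((j * dc : Nat) : Int) := by
        rw [PySem.Int.floordiv_natCast]
        have : j * dr / dr = j := Nat.mul_div_cancel j hdr'
        rw [this]; push_cast; ring
      rw [hm, hd]
      simp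
    have hnext : ((j * dr : Nat) : Int) + (dr : Int) = (((j + 1) * dr : Nat) : Int) := by
      push_cast; ring
    have hnextc : ((j * dc : Nat) : Int) + (dc : Int) = (((j + 1) * dc : Nat) : Int) := by
      push_cast; ring
    rw [hrow, hnext, hnextc, part2Do_eq_tcount dr dc hdr lines (j + 1)]
    rw [← List.getElem_cons_drop (as := lines) (i := j * dr) hlt, tcount, hhit]
    have hskip := tcount_skip dr dc lines j (j * dr + 1) (by omega) (by omega)
    have h1 : ((j * dr + 1 : Nat) : Int) = ((j * dr : Nat) : Int) + 1 := by push_cast; ring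
    rw [h1] at hskip
    rw [hskip]
    split_ifs <;> ring
  · rw [dif_neg (by exact_mod_cast Nat.not_lt.mpr hge),
      List.drop_eq_nil_of_le hge, tcount]
    ring
termination_by lines.length - j * dr
decreasing_by
  have : 0 < dr := by exact_mod_cast hdr
  omega

theorem part2Do_zero (dr dc : Nat) (hdr : 0 < (dr : Int)) (lines : List (List Char)) :
    part2Do lines (dr : Int) (dc : Int) hdr 0 0 0 = tcount (dr : Int) (dc : Int) lines 0 := by
  have := part2Do_eq_tcount dr dc hdr lines 0 0
  simpa using this

-- ===== VERDICT (by name: the statement is the Claim_ definition above) =====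
theorem part2_spec : Claim_equal_part2 := by
  intro input _ _
  unfold Spec_part2 part2 part2_alt
  dsimp only
  rw [part2_alt_fold]
  have h11 := part2Do_zero 1 1 (by omega) ((PySem.Str.splitlines input).map String.toList)
  have h13 := part2Do_zero 1 3 (by omega) ((PySem.Str.splitlines input).map String.toList)
  have h15 := part2Do_zero 1 5 (by omega) ((PySem.Str.splitlines input).map String.toList)
  have h17 := part2Do_zero 1 7 (by omega) ((PySem.Str.splitlines input).map String.toList)
  have h21 := part2Do_zero 2 1 (by omega) ((PySem.Str.splitlines input).map String.toList)
  push_cast at h11 h13 h15 h17 h21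
  simp only [List.headD, List.tail, List.foldl_cons, List.foldl_nil]
  rw [h11, h13, h15, h17, h21]
  ring
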